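-- pv_equiv track=rewrite | github.com/charles-ik/python-puzzles-book | challenge_puzzles/starter_code/13.py | filter_strings_with_vowels
-- ===== SOURCE A (Python) =====
-- def has_vowel(input_str: str) -> bool:
--     '''
--     Takes an input string and returns True if it contains a vowel
--     '''
--
--     for vowel in 'aeiou':
--         if vowel in input_str:
--             return True
--
--     return False
--
-- def filter_strings_with_vowels(input_strs: list[str]) -> list[str]:
--     '''
--     Function takes one parameter
--     When called function returns a new list with all strings that have at least one vowel
--     '''
--     new_list = []
--
--     for element in input_strs:
--         if has_vowel(element) == True:
--             new_list.append(element)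
--         else:
--             continue
--     return new_list
-- ===== SOURCE B (Python) =====
-- VOWELS = set('aeiou')
--
-- def filter_strings_with_vowels(input_strs: list[str]) -> list[str]:
--     return [s for s in input_strs if any(c in VOWELS for c in s)]
-- ===== Notes on version B (the rewrite author's own statement) =====
-- stated objective: idiomatic
-- what changed: B inverts the nested traversal: instead of scanning the string five times (once per vowel substring test) and appending to an accumulator list, it filters with one comprehension that scans each string's characters once against a vowel set.
import Mathlib
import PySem

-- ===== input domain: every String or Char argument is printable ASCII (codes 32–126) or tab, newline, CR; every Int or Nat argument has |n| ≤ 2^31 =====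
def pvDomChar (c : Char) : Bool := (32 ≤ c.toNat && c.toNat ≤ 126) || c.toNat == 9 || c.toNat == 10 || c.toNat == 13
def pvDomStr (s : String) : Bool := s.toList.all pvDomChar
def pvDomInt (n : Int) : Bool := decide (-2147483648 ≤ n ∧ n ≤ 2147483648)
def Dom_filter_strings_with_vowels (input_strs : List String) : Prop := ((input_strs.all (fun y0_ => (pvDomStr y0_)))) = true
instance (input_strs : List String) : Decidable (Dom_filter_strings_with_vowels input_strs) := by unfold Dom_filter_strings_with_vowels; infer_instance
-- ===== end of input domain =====

-- B replaces A's per-vowel substring scans and accumulator loop by one filter that scans each string's characters once against a vowel set (idiomatic).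

-- ===== PORT A =====
-- has_vowel: loop over 'aeiou', early return on the first vowel that is a substring
def pvHasVowelLoop (vs : List Char) (s : String) : Bool :=
  match vs with
  | [] => false
  | v :: rest => if PySem.Chars.isIn [v] s.toList then true else pvHasVowelLoop rest s

def has_vowel (input_str : String) : Bool :=
  pvHasVowelLoop "aeiou".toList input_str

def filter_strings_with_vowels (input_strs : List String) : List String :=
  input_strs.foldl (fun new_list element =>
    if has_vowel element == true then new_list ++ [element] else new_list) []

-- ===== PORT B =====
def pvVOWELS : PySem.Set Char := PySem.Set.ofList "aeiou".toList

def filter_strings_with_vowels_alt (input_strs : List String) : List String :=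
  input_strs.filter (fun s => s.toList.any (fun c => PySem.Set.contains pvVOWELS c))

-- ===== PRECONDITION & SPEC =====
def Spec_filter_strings_with_vowels (input_strs : List String) (out : List String) : Prop := out = filter_strings_with_vowels_alt input_strs
instance (input_strs : List String) (out : List String) : Decidable (Spec_filter_strings_with_vowels input_strs out) := by unfold Spec_filter_strings_with_vowels; infer_instance

-- ===== CLAIM (what is proved, stated in full; the proofs are below) =====
def Claim_equal_filter_strings_with_vowels : Prop := ∀ (input_strs : List String), Dom_filter_strings_with_vowels input_strs → Spec_filter_strings_with_vowels input_strs (filter_strings_with_vowels input_strs)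

-- ===== LEMMAS AND PROOFS =====

theorem singleton_infix_iff_mem {α : Type} (a : α) (l : List α) : [a] <:+: l ↔ a ∈ l := by
  constructor
  · intro h
    exact h.sublist.mem (List.mem_singleton_self a)
  · intro h
    obtain ⟨s, t, hst⟩ := List.append_of_mem h
    exact ⟨s, t, by simp [hst]⟩

theorem pvHasVowelLoop_eq_any (vs : List Char) (s : String) :
    pvHasVowelLoop vs s = s.toList.any (fun c => vs.contains c) := by
  induction vs with
  | nil => simp [pvHasVowelLoop]
  | cons v rest ih =>
    simp only [pvHasVowelLoop]
    by_cases h : v ∈ s.toList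
    · have : PySem.Chars.isIn [v] s.toList = true :=
        (PySem.Chars.isIn_iff_infix _ _).mpr ((singleton_infix_iff_mem v s.toList).mpr h)
      simp only [this, if_true]
      symm
      simp only [List.any_eq_true]
      exact ⟨v, h, by simp⟩
    · have hin : PySem.Chars.isIn [v] s.toList = false := by
        rw [PySem.Chars.isIn_eq_false_iff]
        intro hinf
        exact h ((singleton_infix_iff_mem v s.toList).mp hinf)
      simp only [hin, Bool.false_eq_true, if_false, ih]
      refine PySem.List.any_congr_mem (fun c hc => ?_)
      simp only [List.contains_cons]
      have : c ≠ v := fun e => h (e ▸ hc)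
      simp [this]

theorem has_vowel_eq_alt (s : String) :
    has_vowel s = s.toList.any (fun c => PySem.Set.contains pvVOWELS c) := by
  rw [has_vowel, pvHasVowelLoop_eq_any]
  simp [pvVOWELS, PySem.Set.contains_eq_listContains]

-- ===== VERDICT (by name: the statement is the Claim_ definition above) =====
theorem filter_strings_with_vowels_spec : Claim_equal_filter_strings_with_vowels := by
  intro input_strs _
  unfold Spec_filter_strings_with_vowels filter_strings_with_vowels filter_strings_with_vowels_alt
  simp only [beq_true]
  rw [PySem.List.foldl_append_if_eq_filter]
  simp only [List.nil_append]
  congr 1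
  funext s
  exact has_vowel_eq_alt s
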